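-- pv_equiv track=rewrite | github.com/Tindilp/Practicas-Python | Evaluacion - mazo/Evaluacion - mazo.py | repite_palos
-- ===== SOURCE A (Python) =====
-- def repite_palos(mano):
--     d = {}
--     # recorro el dic en forma de lista
--     for key, value in mano.items():
--         ls = []
--         # accedo a los elementos de la lista y los voy agregando a una lista
--         for element in value:
--             ls.append(element[0])
--         # luego comparamos el tamaño de la lista, con el tamaño de la lista
--         # aplicando el set.
--         # Set elimina repetidos asi que si son diferentes es xq habia palos
--         # iguales
--         if (len(ls) != len(set(ls))):
--             d[key] = "tiene repetidos"
--         else :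
--             d[key] = "NO tiene repetidos"
--     return d
-- ===== SOURCE B (Python) =====
-- def repite_palos(mano):
--     d = {}
--     for key, value in mano.items():
--         seen = set()
--         result = "NO tiene repetidos"
--         for element in value:
--             e0 = element[0]
--             if e0 in seen:
--                 result = "tiene repetidos"
--                 break
--             seen.add(e0)
--         d[key] = result
--     return d
-- ===== Notes on version B (the rewrite author's own statement) =====
-- stated objective: alternative
-- what changed: Per hand, A collects every first card into a list and then compares the list's length with the length of its deduplication; B instead makes one short-circuiting pass that grows a seen-set and stops at the first repeated suit.
import Mathlib
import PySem

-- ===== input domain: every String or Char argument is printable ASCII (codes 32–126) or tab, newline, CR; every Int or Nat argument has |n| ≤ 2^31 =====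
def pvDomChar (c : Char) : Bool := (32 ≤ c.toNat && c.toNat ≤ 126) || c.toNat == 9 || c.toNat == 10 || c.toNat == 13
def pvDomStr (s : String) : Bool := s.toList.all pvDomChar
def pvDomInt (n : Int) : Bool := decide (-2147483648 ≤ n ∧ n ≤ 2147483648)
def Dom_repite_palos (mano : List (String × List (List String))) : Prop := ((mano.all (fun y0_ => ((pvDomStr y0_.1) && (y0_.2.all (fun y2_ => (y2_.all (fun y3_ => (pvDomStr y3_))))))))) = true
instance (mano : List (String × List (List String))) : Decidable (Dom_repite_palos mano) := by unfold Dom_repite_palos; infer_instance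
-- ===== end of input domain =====

-- B replaces A's build-full-list-then-compare-lengths duplicate test with a single
-- short-circuiting seen-set scan per hand that stops at the first repeated suit.


-- ===== PORT A =====
-- element[0]; Python raises IndexError on an empty card, excluded by Pre_ below.
def pvFirst (element : List String) : String := (PySem.List.pyGet? element 0).getD ""

def repite_palos (mano : List (String × List (List String))) : List (String × String) :=
  (mano.foldl (fun (d : PySem.Dict String String) kv =>
      let ls := kv.2.foldl (fun ls element => ls ++ [pvFirst element]) []
      if ls.length ≠ (PySem.Set.ofList ls).length then d.insert kv.1 "tiene repetidos"
      else d.insert kv.1 "NO tiene repetidos")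
    PySem.Dict.empty).items

-- ===== PORT B =====
-- the inner short-circuiting loop of Source B: true iff a first card repeats
def scanDup : List (List String) → PySem.Set String → Bool
  | [], _ => false
  | element :: rest, seen =>
    let e0 := pvFirst element
    if PySem.Set.contains seen e0 then true else scanDup rest (PySem.Set.add seen e0)

def repite_palos_alt (mano : List (String × List (List String))) : List (String × String) :=
  (mano.foldl (fun (d : PySem.Dict String String) kv =>
      d.insert kv.1 (if scanDup kv.2 PySem.Set.empty then "tiene repetidos" else "NO tiene repetidos"))
    PySem.Dict.empty).items

-- ===== PRECONDITION & SPEC =====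
-- Pre_ excludes inputs containing an empty card list, on which A (and B) raise IndexError at element[0].
def Pre_repite_palos (mano : List (String × List (List String))) : Prop :=
  (mano.all (fun kv => kv.2.all (fun element => !element.isEmpty))) = true
instance (mano : List (String × List (List String))) : Decidable (Pre_repite_palos mano) := by unfold Pre_repite_palos; infer_instance

def pvWitness_repite_palos : (List (String × List (List String))) :=
  [("jugador1", [["oro", "7"], ["copa", "1"], ["oro", "3"]]), ("jugador2", [["espada", "2"]])]

def Spec_repite_palos (mano : List (String × List (List String))) (out : List (String × String)) : Prop := out = repite_palos_alt mano
instance (mano : List (String × List (List String))) (out : List (String × String)) : Decidable (Spec_repite_palos mano out) := by unfold Spec_repite_palos; infer_instance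

-- ===== CLAIM (what is proved, stated in full; the proofs are below) =====
def Claim_equal_repite_palos : Prop := ∀ (mano : List (String × List (List String))), Dom_repite_palos mano → Pre_repite_palos mano → Spec_repite_palos mano (repite_palos mano)

-- ===== LEMMAS AND PROOFS =====

-- A's inner loop builds the map of first cards
lemma foldl_app_map (value : List (List String)) (acc : List String) :
    value.foldl (fun ls element => ls ++ [pvFirst element]) acc = acc ++ value.map pvFirst := by
  induction value generalizing acc with
  | nil => simp
  | cons e rest ih => simp [List.foldl_cons, ih, List.append_assoc]

lemma contains_iff_mem (s : List String) (x : String) : PySem.Set.contains s x = true ↔ x ∈ s := by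
  simp [PySem.Set.contains]

-- length of the seen-set accumulator characterises Nodup
lemma foldl_add_len (ls : List String) : ∀ (s : List String), s.Nodup →
    (s ++ ls).Nodup ∧ (ls.foldl PySem.Set.add s).Nodup ∧
      (ls.foldl PySem.Set.add s).length = s.length + ls.length
    ∨ ¬ (s ++ ls).Nodup ∧ (ls.foldl PySem.Set.add s).Nodup ∧
      (ls.foldl PySem.Set.add s).length < s.length + ls.length := by
  induction ls with
  | nil => intro s hs; left; simpa using hs
  | cons x rest ih =>
    intro s hs
    have hbad : x ∈ s → ¬ (s ++ x :: rest).Nodup := by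
      intro hx hnd
      rw [List.nodup_append] at hnd
      exact hnd.2.2 x hx x (List.mem_cons_self ..) rfl
    by_cases hx : x ∈ s
    · right
      have hadd : PySem.Set.add s x = s := by
        simp [PySem.Set.add, hx]
      rcases ih s hs with ⟨_, hn, hl⟩ | ⟨_, hn, hl⟩
      · exact ⟨hbad hx, by simpa [hadd] using hn,
          by simp only [List.foldl_cons, hadd, List.length_cons]; omega⟩
      · exact ⟨hbad hx, by simpa [hadd] using hn,
          by simp only [List.foldl_cons, hadd, List.length_cons]; omega⟩
    · have hadd : PySem.Set.add s x = s ++ [x] := by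
        simp [PySem.Set.add, hx]
      have hs' : (s ++ [x]).Nodup := by
        rw [List.nodup_append]
        exact ⟨hs, List.nodup_singleton x, by
          intro a ha b hb hab; simp at hb; exact hx (hb ▸ hab ▸ ha)⟩
      have hshift : (s ++ [x]) ++ rest = s ++ x :: rest := by simp
      rcases ih (s ++ [x]) hs' with ⟨hnd, hn, hl⟩ | ⟨hnd, hn, hl⟩
      · left
        refine ⟨hshift ▸ hnd, by simpa [hadd] using hn, ?_⟩
        simp only [List.foldl_cons, hadd]
        simp only [List.length_append, List.length_cons, List.length_nil] at hl ⊢; omega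
      · right
        refine ⟨hshift ▸ hnd, by simpa [hadd] using hn, ?_⟩
        simp only [List.foldl_cons, hadd]
        simp only [List.length_append, List.length_cons, List.length_nil] at hl ⊢; omega

-- A's length test decides Nodup of the first-card list
lemma lenTest_iff (ls : List String) :
    (ls.length ≠ (PySem.Set.ofList ls).length) ↔ ¬ ls.Nodup := by
  have h := foldl_add_len ls [] List.nodup_nil
  rcases h with ⟨hnd, _, hl⟩ | ⟨hnd, _, hl⟩ <;>
    simp only [List.nil_append, List.length_nil] at hnd hl
  · constructor
    · intro h; exact absurd (by rw [PySem.Set.ofList_eq_foldl, hl]; omega) h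
    · intro h; exact absurd hnd h
  · constructor
    · intro _; exact hnd
    · intro _; rw [PySem.Set.ofList_eq_foldl]; omega

-- B's scan decides Nodup of the first-card list, past any nodup seen-set
lemma scanDup_iff (value : List (List String)) : ∀ (s : List String), s.Nodup →
    (scanDup value s = false ↔ (s ++ value.map pvFirst).Nodup) := by
  induction value with
  | nil => intro s hs; simpa [scanDup] using hs
  | cons e rest ih =>
    intro s hs
    by_cases hx : pvFirst e ∈ s
    · have hc : PySem.Set.contains s (pvFirst e) = true := (contains_iff_mem s _).2 hx
      simp only [scanDup, hc, if_true]
      constructor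
      · intro h; cases h
      · intro h
        exfalso
        rw [List.map_cons, List.nodup_append] at h
        exact h.2.2 (pvFirst e) hx (pvFirst e) (List.mem_cons_self ..) rfl
    · have hc : PySem.Set.contains s (pvFirst e) = false := by
        rcases h : PySem.Set.contains s (pvFirst e) with _ | _
        · rfl
        · exact absurd ((contains_iff_mem s _).1 h) hx
      have hadd : PySem.Set.add s (pvFirst e) = s ++ [pvFirst e] := by
        simp [PySem.Set.add, hx]
      have hs' : (s ++ [pvFirst e]).Nodup := by
        rw [List.nodup_append]
        exact ⟨hs, List.nodup_singleton _, by
          intro a ha b hb hab; simp at hb; exact hx (hb ▸ hab ▸ ha)⟩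
      have heq : (s ++ [pvFirst e]) ++ rest.map pvFirst = s ++ (e :: rest).map pvFirst := by simp
      simp only [scanDup, hc, Bool.false_eq_true, if_false, hadd]
      rw [ih (s ++ [pvFirst e]) hs', heq]

-- per-hand: A's verdict equals B's verdict
lemma verdict_eq (value : List (List String)) :
    (if (value.foldl (fun ls element => ls ++ [pvFirst element]) []).length ≠
        (PySem.Set.ofList (value.foldl (fun ls element => ls ++ [pvFirst element]) [])).length
     then "tiene repetidos" else "NO tiene repetidos")
    = (if scanDup value PySem.Set.empty then "tiene repetidos" else "NO tiene repetidos") := by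
  have hls : value.foldl (fun ls element => ls ++ [pvFirst element]) [] = value.map pvFirst := by
    simpa using foldl_app_map value []
  have hempty : (PySem.Set.empty : PySem.Set String) = [] := rfl
  rw [hls, hempty]
  have hscan := scanDup_iff value [] List.nodup_nil
  simp only [List.nil_append] at hscan
  by_cases hnd : (value.map pvFirst).Nodup
  · have h1 : ¬ ((value.map pvFirst).length ≠ (PySem.Set.ofList (value.map pvFirst)).length) := by
      intro h; exact (lenTest_iff _).1 h hnd
    rw [if_neg h1, hscan.2 hnd]
    simp
  · have h1 : (value.map pvFirst).length ≠ (PySem.Set.ofList (value.map pvFirst)).length :=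
      (lenTest_iff _).2 hnd
    have h2 : scanDup value [] = true := by
      rcases h : scanDup value [] with _ | _
      · exact absurd (hscan.1 h) hnd
      · rfl
    rw [if_pos h1, h2]
    simp

lemma foldl_dict_eq (mano : List (String × List (List String))) :
    ∀ (d : PySem.Dict String String),
    mano.foldl (fun (d : PySem.Dict String String) kv =>
      let ls := kv.2.foldl (fun ls element => ls ++ [pvFirst element]) []
      if ls.length ≠ (PySem.Set.ofList ls).length then d.insert kv.1 "tiene repetidos"
      else d.insert kv.1 "NO tiene repetidos") d
    = mano.foldl (fun (d : PySem.Dict String String) kv =>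
      d.insert kv.1 (if scanDup kv.2 PySem.Set.empty then "tiene repetidos" else "NO tiene repetidos")) d := by
  induction mano with
  | nil => intro d; rfl
  | cons kv rest ih =>
    intro d
    simp only [List.foldl_cons]
    rw [← verdict_eq kv.2]
    split_ifs with h
    · exact ih _
    · exact ih _

-- ===== VERDICT (by name: the statement is the Claim_ definition above) =====
theorem repite_palos_spec : Claim_equal_repite_palos := by
  intro mano _ _
  unfold Spec_repite_palos repite_palos repite_palos_alt
  rw [foldl_dict_eq]
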